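-- pv_equiv track=rewrite | github.com/AbdeAMNR/python-training | Lecture 01/03Simple.py | calcIndice
-- ===== SOURCE A (Python) =====
-- def calcIndice(m):
--     myList = []
--     U = 2
--     i = 1
--     myList.append(U)
--     while True:
--         U = 3 * U - 1
--         i += 1
--         if U >= m:
--             return myList
--         myList.append(U)
-- ===== SOURCE B (Python) =====
-- def calcIndice(m):
--     # closed form: the k-th term (1-based) is (3**k + 1) // 2 = 2, 5, 14, 41, ...
--     res = [2]
--     k = 2
--     while True:
--         t = (3 ** k + 1) // 2
--         if t >= m:
--             return res
--         res.append(t)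
--         k += 1
-- ===== Notes on version B (the rewrite author's own statement) =====
-- stated objective: alternative
-- what changed: B drops the running accumulator U = 3*U-1 and generates each term directly from its 1-based index k via the closed form (3**k + 1)//2, keeping only the index as loop state.
import Mathlib
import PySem

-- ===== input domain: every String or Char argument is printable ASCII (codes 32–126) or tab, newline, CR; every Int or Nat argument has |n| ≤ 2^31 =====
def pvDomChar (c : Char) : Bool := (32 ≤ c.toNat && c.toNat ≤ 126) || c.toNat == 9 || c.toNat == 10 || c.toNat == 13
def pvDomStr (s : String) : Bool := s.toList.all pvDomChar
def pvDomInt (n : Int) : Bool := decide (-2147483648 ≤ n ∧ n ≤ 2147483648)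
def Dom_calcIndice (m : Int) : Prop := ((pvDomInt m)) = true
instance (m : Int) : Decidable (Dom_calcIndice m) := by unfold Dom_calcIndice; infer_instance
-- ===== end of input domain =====

-- B replaces A's running accumulator U = 3*U - 1 by the closed form (3^k + 1) // 2 indexed
-- by the 1-based term index k (alternative decomposition, same asymptotic cost).


-- ===== PORT A =====
-- A's while-True loop: state is the running value U (and the unused counter i,
-- kept for literalness); the hypothesis 2 ≤ U is a totality guard only.
def calcA_loop (m U : Int) (i : Int) (acc : List Int) (hU : 2 ≤ U) : List Int :=
  if _h : 3 * U - 1 ≥ m then acc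
  else calcA_loop m (3 * U - 1) (i + 1) (acc ++ [3 * U - 1]) (by omega)
termination_by (m - (3 * U - 1)).toNat
decreasing_by
  simp only [not_le] at _h
  omega

def calcIndice (m : Int) : List Int :=
  -- myList = []; U = 2; i = 1; myList.append(U); while True: ...
  calcA_loop m 2 1 [2] (by norm_num)

-- ===== PORT B =====
-- 2 * ((3^k + 1) // 2) = 3^k + 1 (the dividend is even); used for B's termination.
theorem two_mul_term (k : Nat) :
    2 * PySem.Int.floordiv ((3:Int) ^ k + 1) 2 = (3:Int) ^ k + 1 := by
  rw [PySem.Int.floordiv_eq_ediv_of_pos (by norm_num)]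
  have h : (2:Int) ∣ (3:Int) ^ k + 1 := by
    have : (3:Int) ^ k % 2 = 1 := by
      induction k with
      | zero => decide
      | succ n ih => rw [pow_succ]; omega
    omega
  omega

theorem pow3_lt (k : Nat) : (3:Int) ^ k < (3:Int) ^ (k + 1) := by
  have h : (0:Int) < 3 ^ k := by positivity
  rw [pow_succ]; nlinarith

-- B's while-True loop: state is only the 1-based index k of the next candidate term.
def calcB_loop (m : Int) (k : Nat) (acc : List Int) : List Int :=
  let t := PySem.Int.floordiv ((3:Int) ^ k + 1) 2
  if _h : t ≥ m then acc
  else calcB_loop m (k + 1) (acc ++ [t])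
termination_by (m - PySem.Int.floordiv ((3:Int) ^ k + 1) 2).toNat
decreasing_by
  simp only [not_le] at _h
  have h1 := two_mul_term k
  have h2 := two_mul_term (k + 1)
  have h3 := pow3_lt k
  omega

def calcIndice_alt (m : Int) : List Int :=
  -- res = [2]; k = 2; while True: t = (3**k + 1)//2; ...
  calcB_loop m 2 [2]

-- ===== PRECONDITION & SPEC =====
def Spec_calcIndice (m : Int) (out : List Int) : Prop := out = calcIndice_alt m
instance (m : Int) (out : List Int) : Decidable (Spec_calcIndice m out) := by unfold Spec_calcIndice; infer_instance

-- ===== CLAIM (what is proved, stated in full; the proofs are below) =====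
def Claim_equal_calcIndice : Prop := ∀ (m : Int), Dom_calcIndice m → Spec_calcIndice m (calcIndice m)

-- ===== LEMMAS AND PROOFS =====

-- Key identity: 3 * t_k - 1 = t_{k+1} where t_k = (3^k + 1) // 2.
theorem step_term (k : Nat) :
    3 * PySem.Int.floordiv ((3:Int) ^ k + 1) 2 - 1
      = PySem.Int.floordiv ((3:Int) ^ (k + 1) + 1) 2 := by
  have h1 := two_mul_term k
  have h2 := two_mul_term (k + 1)
  have h3 : (3:Int) ^ (k + 1) = 3 * 3 ^ k := by rw [pow_succ]; ring
  omega

-- A's loop started at U = t_k equals B's loop started at index k + 1.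
theorem loop_eq (n : Nat) : ∀ (m : Int) (k : Nat) (i : Int) (acc : List Int)
    (hU : 2 ≤ PySem.Int.floordiv ((3:Int) ^ k + 1) 2),
    (m - PySem.Int.floordiv ((3:Int) ^ (k + 1) + 1) 2).toNat ≤ n →
    calcA_loop m (PySem.Int.floordiv ((3:Int) ^ k + 1) 2) i acc hU
      = calcB_loop m (k + 1) acc := by
  induction n with
  | zero =>
    intro m k i acc hU hn
    rw [calcA_loop, calcB_loop]
    simp only [step_term k]
    split
    · rfl
    · exfalso
      rename_i hc
      simp only [not_le] at hc
      omega
  | succ n ih =>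
    intro m k i acc hU hn
    rw [calcA_loop, calcB_loop]
    simp only [step_term k]
    split
    · rfl
    · rename_i hc
      simp only [not_le] at hc
      have hk1 := two_mul_term k
      have hk2 := two_mul_term (k + 1)
      have hk3 := two_mul_term (k + 1 + 1)
      have hp1 := pow3_lt k
      have hp2 := pow3_lt (k + 1)
      have hpos : (0:Int) < 3 ^ k := by positivity
      have hs1 := step_term k
      have hs2 := step_term (k + 1)
      have hU' : 2 ≤ PySem.Int.floordiv ((3:Int) ^ (k + 1) + 1) 2 := by omega
      have hn' : (m - PySem.Int.floordiv ((3:Int) ^ (k + 1 + 1) + 1) 2).toNat ≤ n := by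
        omega
      exact ih m (k + 1) (i + 1)
        (acc ++ [PySem.Int.floordiv ((3:Int) ^ (k + 1) + 1) 2]) hU' hn'

-- ===== VERDICT (by name: the statement is the Claim_ definition above) =====
theorem calcIndice_spec : Claim_equal_calcIndice := by
  intro m _
  unfold Spec_calcIndice calcIndice calcIndice_alt
  have e : PySem.Int.floordiv ((3:Int) ^ 1 + 1) 2 = 2 := by decide
  have h := loop_eq (m - PySem.Int.floordiv ((3:Int) ^ 2 + 1) 2).toNat m 1 1 [2]
    (by rw [e]) (le_refl _)
  simp only [e] at h
  exact h
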